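-- pv_equiv track=rewrite | github.com/vmiranda0904/PBTAPP | services/ai-engine/app/priority_engine.py | prioritize_insights
-- ===== SOURCE A (Python) =====
-- def prioritize_insights(insights: list[str]) -> list[dict[str, str]]:
--     prioritized: list[dict[str, str]] = []
--
--     for insight in insights:
--         lowered = insight.lower()
--         if 'dominant' in lowered or 'exploit' in lowered:
--             prioritized.append({'text': insight, 'level': 'high'})
--         elif 'trend' in lowered:
--             prioritized.append({'text': insight, 'level': 'medium'})
--         else:
--             prioritized.append({'text': insight, 'level': 'low'})
--
--     priority_order = {'high': 0, 'medium': 1, 'low': 2}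
--     return sorted(prioritized, key=lambda item: priority_order[item['level']])
-- ===== SOURCE B (Python) =====
-- def prioritize_insights(insights: list[str]) -> list[dict[str, str]]:
--     # One pass: bucket into three priority lists, then concatenate (counting sort).
--     high: list[dict[str, str]] = []
--     medium: list[dict[str, str]] = []
--     low: list[dict[str, str]] = []
--     for insight in insights:
--         lowered = insight.lower()
--         if 'dominant' in lowered or 'exploit' in lowered:
--             high.append({'text': insight, 'level': 'high'})
--         elif 'trend' in lowered:
--             medium.append({'text': insight, 'level': 'medium'})
--         else:
--             low.append({'text': insight, 'level': 'low'})
--     return high + medium + low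
-- ===== Notes on version B (the rewrite author's own statement) =====
-- stated objective: alternative
-- what changed: replaces the classify-then-stable-sort-by-priority pass with a single pass that buckets insights into three priority lists and concatenates them (a counting-sort-style bucketing, no sort call)
import Mathlib
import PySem

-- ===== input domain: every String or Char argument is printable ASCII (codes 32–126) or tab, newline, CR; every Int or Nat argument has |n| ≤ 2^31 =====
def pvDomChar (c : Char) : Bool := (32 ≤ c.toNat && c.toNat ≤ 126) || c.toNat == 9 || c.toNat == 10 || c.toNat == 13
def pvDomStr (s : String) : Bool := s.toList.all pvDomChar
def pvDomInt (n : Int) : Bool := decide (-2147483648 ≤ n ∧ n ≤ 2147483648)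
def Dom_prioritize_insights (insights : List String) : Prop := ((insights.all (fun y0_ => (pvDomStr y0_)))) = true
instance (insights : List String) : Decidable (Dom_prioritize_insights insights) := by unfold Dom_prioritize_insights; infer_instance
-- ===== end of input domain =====

-- B replaces A's classify-then-stable-sort with one bucketing pass and a concatenation (alternative algorithm; not measured faster).

-- ===== PORT A =====
-- the KeyError of 'priority_order[item['level']]' is unreachable (every appended item carries a
-- 'level' among the dict's keys), so the two getD defaults below are never used
def prioritize_insights (insights : List String) : List (List (String × String)) :=
  let prioritized := insights.foldl (fun acc insight =>
    let lowered := PySem.Str.lower insight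
    if PySem.Str.isIn "dominant" lowered || PySem.Str.isIn "exploit" lowered then
      acc ++ [[("text", insight), ("level", "high")]]
    else if PySem.Str.isIn "trend" lowered then
      acc ++ [[("text", insight), ("level", "medium")]]
    else
      acc ++ [[("text", insight), ("level", "low")]]) []
  PySem.List.sorted prioritized
    (fun item => PySem.Dict.getD (PySem.Dict.ofList [("high", (0 : Int)), ("medium", 1), ("low", 2)])
      (PySem.Dict.getD (PySem.Dict.ofList item) "level" "") 3) false

-- ===== PORT B =====
def prioritize_insights_alt (insights : List String) : List (List (String × String)) :=
  let acc := insights.foldl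
    (fun (acc : List (List (String × String)) × List (List (String × String)) × List (List (String × String))) insight =>
      let lowered := PySem.Str.lower insight
      if PySem.Str.isIn "dominant" lowered || PySem.Str.isIn "exploit" lowered then
        (acc.1 ++ [[("text", insight), ("level", "high")]], acc.2.1, acc.2.2)
      else if PySem.Str.isIn "trend" lowered then
        (acc.1, acc.2.1 ++ [[("text", insight), ("level", "medium")]], acc.2.2)
      else
        (acc.1, acc.2.1, acc.2.2 ++ [[("text", insight), ("level", "low")]])) ([], [], [])
  acc.1 ++ acc.2.1 ++ acc.2.2

-- ===== PRECONDITION & SPEC =====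
def Spec_prioritize_insights (insights : List String) (out : List (List (String × String))) : Prop := out = prioritize_insights_alt insights
instance (insights : List String) (out : List (List (String × String))) : Decidable (Spec_prioritize_insights insights out) := by unfold Spec_prioritize_insights; infer_instance

-- ===== CLAIM (what is proved, stated in full; the proofs are below) =====
def Claim_equal_prioritize_insights : Prop := ∀ (insights : List String), Dom_prioritize_insights insights → Spec_prioritize_insights insights (prioritize_insights insights)

-- ===== LEMMAS AND PROOFS =====
def piHigh (s : String) : Bool :=
  PySem.Str.isIn "dominant" (PySem.Str.lower s) || PySem.Str.isIn "exploit" (PySem.Str.lower s)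

def piTrend (s : String) : Bool := PySem.Str.isIn "trend" (PySem.Str.lower s)

def piMk (lvl : String) (s : String) : List (String × String) := [("text", s), ("level", lvl)]

def piClassify (s : String) : List (String × String) :=
  if piHigh s then piMk "high" s else if piTrend s then piMk "medium" s else piMk "low" s

def piKey (item : List (String × String)) : Int :=
  PySem.Dict.getD (PySem.Dict.ofList [("high", (0 : Int)), ("medium", 1), ("low", 2)])
    (PySem.Dict.getD (PySem.Dict.ofList item) "level" "") 3

theorem piKey_high (s : String) : piKey (piMk "high" s) = 0 := rfl
theorem piKey_medium (s : String) : piKey (piMk "medium" s) = 1 := rfl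
theorem piKey_low (s : String) : piKey (piMk "low" s) = 2 := rfl

theorem insertBy_append_of_not_before {α : Type} (before : α → α → Bool) (x : α)
    (A B : List α) (h : ∀ a ∈ A, before x a = false) :
    PySem.List.insertBy before x (A ++ B) = A ++ PySem.List.insertBy before x B := by
  induction A with
  | nil => rfl
  | cons a A ih =>
    have ha : before x a = false := h a (by simp)
    simp only [List.cons_append, PySem.List.insertBy, ha, Bool.false_eq_true, if_false,
      ih (fun b hb => h b (by simp [hb]))]

theorem insertBy_eq_cons_of_before {α : Type} (before : α → α → Bool) (x : α)
    (B : List α) (h : ∀ b ∈ B, before x b = true) :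
    PySem.List.insertBy before x B = x :: B := by
  cases B with
  | nil => rfl
  | cons b B => simp only [PySem.List.insertBy, h b (by simp), if_true]

theorem insertBy_eq_append_singleton_of_not_before {α : Type} (before : α → α → Bool) (x : α)
    (B : List α) (h : ∀ b ∈ B, before x b = false) :
    PySem.List.insertBy before x B = B ++ [x] := by
  induction B with
  | nil => rfl
  | cons b B ih =>
    simp only [PySem.List.insertBy, h b (by simp), Bool.false_eq_true, if_false,
      ih (fun a ha => h a (by simp [ha])), List.cons_append]

theorem sorted_three {α : Type} (key : α → Int) (ys : List α)
    (h : ∀ y ∈ ys, key y = 0 ∨ key y = 1 ∨ key y = 2) :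
    PySem.List.sorted ys key false =
      ys.filter (fun y => key y == 0) ++ ys.filter (fun y => key y == 1) ++
        ys.filter (fun y => key y == 2) := by
  induction ys using List.reverseRecOn with
  | nil => rfl
  | append_singleton ys y ih =>
    have hys : ∀ z ∈ ys, key z = 0 ∨ key z = 1 ∨ key z = 2 := fun z hz => h z (by simp [hz])
    rw [PySem.List.sorted_eq_foldl_insertBy, List.foldl_append, List.foldl_cons, List.foldl_nil,
      ← PySem.List.sorted_eq_foldl_insertBy, ih hys]
    have mem0 : ∀ a ∈ ys.filter (fun y => key y == 0), key a = 0 := by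
      intro a ha; simpa using (List.of_mem_filter ha)
    have mem1 : ∀ a ∈ ys.filter (fun y => key y == 1), key a = 1 := by
      intro a ha; simpa using (List.of_mem_filter ha)
    have mem2 : ∀ a ∈ ys.filter (fun y => key y == 2), key a = 2 := by
      intro a ha; simpa using (List.of_mem_filter ha)
    rcases h y (by simp) with hy | hy | hy
    · -- key y = 0 : y goes right after the 0-block
      rw [List.append_assoc,
        insertBy_append_of_not_before _ y (ys.filter (fun y => key y == 0)) _
          (fun a ha => by simp [hy, mem0 a ha]),
        insertBy_eq_cons_of_before _ _ _
          (fun b hb => by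
            rcases List.mem_append.mp hb with hb | hb
            · simp [hy, mem1 b hb]
            · simp [hy, mem2 b hb])]
      simp [List.filter_append, hy]
    · -- key y = 1 : y goes right after the 1-block
      rw [insertBy_append_of_not_before _ y
          (ys.filter (fun y => key y == 0) ++ ys.filter (fun y => key y == 1)) _
          (fun a ha => by
            rcases List.mem_append.mp ha with ha | ha
            · simp [hy, mem0 a ha]
            · simp [hy, mem1 a ha]),
        insertBy_eq_cons_of_before _ _ _ (fun b hb => by simp [hy, mem2 b hb])]
      simp [List.filter_append, hy]
    · -- key y = 2 : y goes at the very end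
      rw [insertBy_append_of_not_before _ y
          (ys.filter (fun y => key y == 0) ++ ys.filter (fun y => key y == 1)) _
          (fun a ha => by
            rcases List.mem_append.mp ha with ha | ha
            · simp [hy, mem0 a ha]
            · simp [hy, mem1 a ha]),
        insertBy_eq_append_singleton_of_not_before _ _ _
          (fun a ha => by simp [hy, mem2 a ha])]
      simp [List.filter_append, hy]

theorem a_loop_eq_map (insights : List String) :
    insights.foldl (fun acc insight =>
      let lowered := PySem.Str.lower insight
      if PySem.Str.isIn "dominant" lowered || PySem.Str.isIn "exploit" lowered then
        acc ++ [[("text", insight), ("level", "high")]]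
      else if PySem.Str.isIn "trend" lowered then
        acc ++ [[("text", insight), ("level", "medium")]]
      else
        acc ++ [[("text", insight), ("level", "low")]]) [] = insights.map piClassify := by
  refine (PySem.List.foldl_congr_mem _ _ (fun acc x => acc ++ [piClassify x]) _ ?_).trans ?_
  · intro acc x _
    simp only [piClassify, piHigh, piTrend, piMk]
    split_ifs <;> rfl
  · rw [PySem.List.foldl_append_singleton_eq_map, List.nil_append]

theorem b_loop_eq (insights : List String)
    (h m l : List (List (String × String))) :
    insights.foldl
      (fun (acc : List (List (String × String)) × List (List (String × String)) × List (List (String × String))) insight =>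
        let lowered := PySem.Str.lower insight
        if PySem.Str.isIn "dominant" lowered || PySem.Str.isIn "exploit" lowered then
          (acc.1 ++ [[("text", insight), ("level", "high")]], acc.2.1, acc.2.2)
        else if PySem.Str.isIn "trend" lowered then
          (acc.1, acc.2.1 ++ [[("text", insight), ("level", "medium")]], acc.2.2)
        else
          (acc.1, acc.2.1, acc.2.2 ++ [[("text", insight), ("level", "low")]])) (h, m, l) =
      (h ++ (insights.filter piHigh).map (piMk "high"),
       m ++ (insights.filter (fun s => !piHigh s && piTrend s)).map (piMk "medium"),
       l ++ (insights.filter (fun s => !piHigh s && !piTrend s)).map (piMk "low")) := by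
  induction insights generalizing h m l with
  | nil => simp
  | cons x xs ih =>
    simp only [List.foldl_cons]
    by_cases hh : piHigh x
    · have hh' : (PySem.Str.isIn "dominant" (PySem.Str.lower x) ||
          PySem.Str.isIn "exploit" (PySem.Str.lower x)) = true := hh
      simp only [hh', if_true]
      rw [ih]
      simp [piMk, hh]
    · have hh' : (PySem.Str.isIn "dominant" (PySem.Str.lower x) ||
          PySem.Str.isIn "exploit" (PySem.Str.lower x)) = false := by
        simpa [piHigh] using hh
      by_cases ht : piTrend x
      · have ht' : PySem.Str.isIn "trend" (PySem.Str.lower x) = true := ht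
        simp only [hh', ht', Bool.false_eq_true, if_false, if_true]
        rw [ih]
        simp [piMk, hh, ht]
      · have ht' : PySem.Str.isIn "trend" (PySem.Str.lower x) = false := by
          simpa [piTrend] using ht
        simp only [hh', ht', Bool.false_eq_true, if_false]
        rw [ih]
        simp [piMk, hh, ht]

theorem classify_key_zero (x : String) : (piKey (piClassify x) == 0) = piHigh x := by
  by_cases hh : piHigh x
  · simp [piClassify, hh, piKey_high]
  · by_cases ht : piTrend x <;>
      simp [piClassify, hh, ht, piKey_medium, piKey_low]

theorem classify_key_one (x : String) : (piKey (piClassify x) == 1) = (!piHigh x && piTrend x) := by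
  by_cases hh : piHigh x
  · simp [piClassify, hh, piKey_high]
  · by_cases ht : piTrend x <;>
      simp [piClassify, hh, ht, piKey_medium, piKey_low]

theorem classify_key_two (x : String) : (piKey (piClassify x) == 2) = (!piHigh x && !piTrend x) := by
  by_cases hh : piHigh x
  · simp [piClassify, hh, piKey_high]
  · by_cases ht : piTrend x <;>
      simp [piClassify, hh, ht, piKey_medium, piKey_low]

-- ===== VERDICT (by name: the statement is the Claim_ definition above) =====
theorem prioritize_insights_spec : Claim_equal_prioritize_insights := by
  intro insights _
  unfold Spec_prioritize_insights prioritize_insights prioritize_insights_alt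
  rw [a_loop_eq_map, b_loop_eq]
  have hmem : ∀ y ∈ insights.map piClassify, piKey y = 0 ∨ piKey y = 1 ∨ piKey y = 2 := by
    intro y hy
    rcases List.mem_map.mp hy with ⟨x, _, rfl⟩
    simp only [piClassify]
    split_ifs <;> simp [piKey_high, piKey_medium, piKey_low]
  rw [show (fun item => PySem.Dict.getD (PySem.Dict.ofList [("high", (0 : Int)), ("medium", 1), ("low", 2)])
        (PySem.Dict.getD (PySem.Dict.ofList item) "level" "") 3) = piKey from rfl,
    sorted_three piKey _ hmem]
  simp only [List.filter_map, Function.comp_def, classify_key_zero, classify_key_one,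
    classify_key_two, List.nil_append]
  have e0 : (insights.filter piHigh).map piClassify = (insights.filter piHigh).map (piMk "high") :=
    List.map_congr_left fun x hx => by
      simp [piClassify, (List.mem_filter.mp hx).2]
  have e1 : (insights.filter (fun s => !piHigh s && piTrend s)).map piClassify =
      (insights.filter (fun s => !piHigh s && piTrend s)).map (piMk "medium") :=
    List.map_congr_left fun x hx => by
      have := (List.mem_filter.mp hx).2
      simp only [Bool.and_eq_true, Bool.not_eq_true'] at this
      simp [piClassify, this.1, this.2]
  have e2 : (insights.filter (fun s => !piHigh s && !piTrend s)).map piClassify =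
      (insights.filter (fun s => !piHigh s && !piTrend s)).map (piMk "low") :=
    List.map_congr_left fun x hx => by
      have := (List.mem_filter.mp hx).2
      simp only [Bool.and_eq_true, Bool.not_eq_true'] at this
      simp [piClassify, this.1, this.2]
  rw [e0, e1, e2]
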